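-- pv_equiv track=rewrite | github.com/TaKakun33/Single-Project | Operasi.py | verivication
-- ===== SOURCE A (Python) =====
-- def verivication(Input, first):
--     point = Input.count('.')
--     if point in [0,1]:
--         if first == "Decimal":
--             for i in Input:
--                 if i not in ['0','1','2','3','4','5','6','7','8','9','.']:
--                     return False
--             return True
--
--         elif first == "Binary":
--             for i in Input:
--                 if i not in ['0','1','.']:
--                     return False
--             return True
--
--         elif first == "Octal":
--             for i in Input:
--                 if i not in ['0','1','2','3','4','5','6','7','.']:
--                     return False
--             return True
--
--         elif first == "Hexadecimal":
--             for i in Input: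
--                 if i not in ['0','1','2','3','4','5','6','7','8','9','A','B','C','D','E','F','.']:
--                     return False
--             return True
--     else:
--         return False
-- ===== SOURCE B (Python) =====
-- _RADIX = {"Decimal": 10, "Binary": 2, "Octal": 8, "Hexadecimal": 16}
--
-- def _digit_value(c):
--     o = ord(c)
--     if 48 <= o <= 57:
--         return o - 48
--     if 65 <= o <= 70:
--         return o - 55
--     return 16  # not a digit of any supported base
--
-- def verivication(Input, first):
--     if Input.count('.') > 1:
--         return False
--     radix = _RADIX.get(first)
--     if radix is None:
--         return None
--     # numeric formulation: the largest digit value occurring must be below the radix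
--     worst = -1
--     for c in Input:
--         if c != '.':
--             worst = max(worst, _digit_value(c))
--     return worst < radix
-- ===== Notes on version B (the rewrite author's own statement) =====
-- stated objective: alternative
-- what changed: Replaces A's four per-base membership loops over explicit character lists by a numeric formulation: each character is mapped to its digit value, the maximum value over the input is accumulated in one fold, and a single comparison of that maximum against the base's radix decides validity.
import Mathlib
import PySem

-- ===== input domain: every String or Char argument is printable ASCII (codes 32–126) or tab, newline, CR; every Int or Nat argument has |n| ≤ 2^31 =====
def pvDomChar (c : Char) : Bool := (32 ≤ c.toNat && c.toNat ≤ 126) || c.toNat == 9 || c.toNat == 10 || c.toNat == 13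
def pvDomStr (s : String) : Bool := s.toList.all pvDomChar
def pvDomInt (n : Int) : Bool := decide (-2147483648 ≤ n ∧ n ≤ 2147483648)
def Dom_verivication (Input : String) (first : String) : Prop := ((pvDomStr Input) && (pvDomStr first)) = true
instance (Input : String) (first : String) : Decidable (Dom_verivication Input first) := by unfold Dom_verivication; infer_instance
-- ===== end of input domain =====

-- B replaces A's per-base character-set loops by a digit-value/radix arithmetic: max digit value over the input compared once against the base's radix (alternative; same cost).

-- ===== PORT A =====
-- A's per-branch 'for i in Input: if i not in allowed: return False / return True' loop
def pvLoopA : List Char → List Char → Bool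
  | [], _ => true
  | c :: rest, allowed => if !(allowed.contains c) then false else pvLoopA rest allowed

def verivication (Input : String) (first : String) : Option Bool :=
  let point := PySem.Str.count Input "."
  if point ∈ ([0, 1] : List Nat) then
    if first = "Decimal" then
      some (pvLoopA Input.toList ['0','1','2','3','4','5','6','7','8','9','.'])
    else if first = "Binary" then
      some (pvLoopA Input.toList ['0','1','.'])
    else if first = "Octal" then
      some (pvLoopA Input.toList ['0','1','2','3','4','5','6','7','.'])
    else if first = "Hexadecimal" then
      some (pvLoopA Input.toList ['0','1','2','3','4','5','6','7','8','9','A','B','C','D','E','F','.'])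
    else none
  else some false

-- ===== PORT B =====
def pvRadix : PySem.Dict String Int :=
  ((((PySem.Dict.empty).insert "Decimal" 10).insert "Binary" 2).insert
      "Octal" 8).insert "Hexadecimal" 16

-- B's _digit_value: value of a digit character, 16 when it is no digit of any supported base
def pvDigitValue (c : Char) : Int :=
  if 48 ≤ c.toNat ∧ c.toNat ≤ 57 then (c.toNat : Int) - 48
  else if 65 ≤ c.toNat ∧ c.toNat ≤ 70 then (c.toNat : Int) - 55
  else 16

-- the loop body 'if c != '.': worst = max(worst, _digit_value(c))'
def pvStep (w : Int) (c : Char) : Int := if c ≠ '.' then max w (pvDigitValue c) else w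

def verivication_alt (Input : String) (first : String) : Option Bool :=
  if PySem.Str.count Input "." > 1 then some false
  else
    match pvRadix.get? first with
    | none => none
    | some radix =>
        let worst := Input.toList.foldl pvStep (-1)
        some (decide (worst < radix))

-- ===== PRECONDITION & SPEC =====
def Spec_verivication (Input : String) (first : String) (out : Option Bool) : Prop := out = verivication_alt Input first
instance (Input : String) (first : String) (out : Option Bool) : Decidable (Spec_verivication Input first out) := by unfold Spec_verivication; infer_instance

-- ===== CLAIM =====
def Claim_equal_verivication : Prop := ∀ (Input : String) (first : String), Dom_verivication Input first → Spec_verivication Input first (verivication Input first)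

-- ===== LEMMAS AND PROOFS =====

lemma char_eq_iff_toNat (c d : Char) : c = d ↔ c.toNat = d.toNat :=
  ⟨congrArg _, fun h => Char.ext (UInt32.toNat_inj.mp h)⟩

-- A's early-return loop as an all() over the allowed set (dot at the back)
lemma pvLoopA_eq_all (digits : List Char) :
    ∀ l : List Char, pvLoopA l (digits ++ ['.']) = l.all (fun c => digits.contains c || c == '.') := by
  intro l
  induction l with
  | nil => rfl
  | cons c rest ih =>
      by_cases h : (digits.contains c || c == '.') = true <;>
        simp_all [pvLoopA, List.all_cons]

-- per-character: membership in the base's digit set = digit value below the radix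
lemma char_mem_iff_dv (digits : List Char) (r : Int)
    (hch : ∀ c : Char, (digits.contains c || c == '.') = (c == '.' || decide (pvDigitValue c < r))) :
    ∀ l : List Char, l.all (fun c => digits.contains c || c == '.')
      = l.all (fun c => c == '.' || decide (pvDigitValue c < r)) := by
  intro l
  induction l with
  | nil => rfl
  | cons c rest ih => simp only [List.all_cons, hch]

lemma foldl_max_lt (r : Int) :
    ∀ (l : List Char) (w : Int),
      decide (l.foldl pvStep w < r)
        = (decide (w < r) && l.all (fun c => c == '.' || decide (pvDigitValue c < r))) := by
  intro l
  induction l with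
  | nil => simp
  | cons c rest ih =>
      intro w
      by_cases hc : c = '.'
      · rw [List.foldl_cons, show pvStep w c = w by simp [pvStep, hc], ih]
        simp [hc]
      · rw [List.foldl_cons, show pvStep w c = max w (pvDigitValue c) by simp [pvStep, hc], ih]
        rw [Bool.eq_iff_iff]
        simp [List.all_cons, hc]
        tauto

lemma dec10 (c : Char) :
    ((['0','1','2','3','4','5','6','7','8','9'].contains c) || c == '.')
      = (c == '.' || decide (pvDigitValue c < 10)) := by
  by_cases hd : c = '.'
  · simp [hd]
  · rw [Bool.eq_iff_iff]
    simp only [List.contains_eq_mem, List.mem_cons, List.not_mem_nil, or_false,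
      pvDigitValue, Bool.or_eq_true, beq_iff_eq, decide_eq_true_eq, hd, false_or, or_false]
    simp only [char_eq_iff_toNat, Char.reduceToNat]
    split_ifs <;> omega

lemma dec2 (c : Char) :
    ((['0','1'].contains c) || c == '.') = (c == '.' || decide (pvDigitValue c < 2)) := by
  by_cases hd : c = '.'
  · simp [hd]
  · rw [Bool.eq_iff_iff]
    simp only [List.contains_eq_mem, List.mem_cons, List.not_mem_nil, or_false,
      pvDigitValue, Bool.or_eq_true, beq_iff_eq, decide_eq_true_eq, hd, false_or, or_false]
    simp only [char_eq_iff_toNat, Char.reduceToNat]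
    split_ifs <;> omega

lemma dec8 (c : Char) :
    ((['0','1','2','3','4','5','6','7'].contains c) || c == '.')
      = (c == '.' || decide (pvDigitValue c < 8)) := by
  by_cases hd : c = '.'
  · simp [hd]
  · rw [Bool.eq_iff_iff]
    simp only [List.contains_eq_mem, List.mem_cons, List.not_mem_nil, or_false,
      pvDigitValue, Bool.or_eq_true, beq_iff_eq, decide_eq_true_eq, hd, false_or, or_false]
    simp only [char_eq_iff_toNat, Char.reduceToNat]
    split_ifs <;> omega

lemma dec16 (c : Char) :
    ((['0','1','2','3','4','5','6','7','8','9','A','B','C','D','E','F'].contains c) || c == '.')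
      = (c == '.' || decide (pvDigitValue c < 16)) := by
  by_cases hd : c = '.'
  · simp [hd]
  · rw [Bool.eq_iff_iff]
    simp only [List.contains_eq_mem, List.mem_cons, List.not_mem_nil, or_false,
      pvDigitValue, Bool.or_eq_true, beq_iff_eq, decide_eq_true_eq, hd, false_or, or_false]
    simp only [char_eq_iff_toNat, Char.reduceToNat]
    split_ifs <;> omega

-- A's branch result = B's fold result for a known base
lemma branch_eq (Input : String) (digits : List Char) (r : Int) (hr : (-1 : Int) < r)
    (hch : ∀ c : Char, (digits.contains c || c == '.') = (c == '.' || decide (pvDigitValue c < r))) :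
    pvLoopA Input.toList (digits ++ ['.'])
      = decide (Input.toList.foldl pvStep (-1) < r) := by
  rw [foldl_max_lt r Input.toList (-1), pvLoopA_eq_all digits Input.toList,
    char_mem_iff_dv digits r hch Input.toList]
  simp [hr]

lemma pvRadix_get?_other (first : String)
    (h1 : first ≠ "Decimal") (h2 : first ≠ "Binary") (h3 : first ≠ "Octal")
    (h4 : first ≠ "Hexadecimal") : pvRadix.get? first = none := by
  simp [pvRadix, PySem.Dict.get?_insert, h1, h2, h3, h4]

-- ===== VERDICT =====
theorem verivication_spec : Claim_equal_verivication := by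
  intro Input first _
  unfold Spec_verivication verivication verivication_alt
  by_cases hn : PySem.Str.count Input "." ∈ ([0, 1] : List Nat)
  · have hle : ¬ PySem.Str.count Input "." > 1 := by
      simp only [List.mem_cons, List.not_mem_nil, or_false] at hn
      omega
    rw [if_pos hn, if_neg hle]
    by_cases h1 : first = "Decimal"
    · subst h1
      rw [show pvRadix.get? "Decimal" = some 10 by rfl]
      exact congrArg some (branch_eq Input _ 10 (by norm_num) dec10)
    · by_cases h2 : first = "Binary"
      · subst h2
        rw [show pvRadix.get? "Binary" = some 2 by rfl]
        simp only [if_neg h1]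
        exact congrArg some (branch_eq Input _ 2 (by norm_num) dec2)
      · by_cases h3 : first = "Octal"
        · subst h3
          rw [show pvRadix.get? "Octal" = some 8 by rfl]
          simp only [if_neg h1, if_neg h2]
          exact congrArg some (branch_eq Input _ 8 (by norm_num) dec8)
        · by_cases h4 : first = "Hexadecimal"
          · subst h4
            rw [show pvRadix.get? "Hexadecimal" = some 16 by rfl]
            simp only [if_neg h1, if_neg h2, if_neg h3]
            exact congrArg some (branch_eq Input _ 16 (by norm_num) dec16)
          · rw [pvRadix_get?_other first h1 h2 h3 h4]
            simp [h1, h2, h3, h4]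
  · have hgt : PySem.Str.count Input "." > 1 := by
      simp only [List.mem_cons, List.not_mem_nil, or_false] at hn
      omega
    rw [if_neg hn, if_pos hgt]
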